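-- pv_equiv track=rewrite | github.com/LULLULALLA0525/Everyday_CodingTest | 과제 제출하기.py | solution
-- ===== SOURCE A (Python) =====
-- from itertools import permutations
--
-- def solution(durations, problems):
--   result = 7001
--   plans = list(permutations(range(len(problems))))
--
--   for plan in plans:  # 반복 횟수 최대 7!(5,040)
--     learn = 0
--     knowledges = [[] for _ in range(len(plan))]  # 각 인덱스의 리스트는 해당 날에 기억하는 지식의 종류
--     for day in range(len(plan)):  # 반복 횟수 최대 7
--       problem = problems[plan[day]]
--       knowledges_to_learn = list(set(problem) - set(knowledges[day]))
--       learn += len(knowledges_to_learn)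
--
--       if learn >= result:
--         break
--
--       for knowledge in knowledges_to_learn:   # 반복 횟수 최대 1,000
--         for date in range(day, min(day + durations[knowledge], len(plan))):   # 반복 횟수 최대 7
--           knowledges[date].append(knowledge)
--
--     result = min(learn, result)
--
--   return result
-- ===== SOURCE B (Python) =====
-- from itertools import permutations
--
-- def solution(durations, problems):
--     def cost(plan):
--         # full learning count of this ordering, no pruning: lazy expiry times per knowledge
--         expiry = {}
--         total = 0
--         for day in range(len(plan)):
--             for k in set(problems[plan[day]]):
--                 if day >= expiry.get(k, day):  # not currently remembered
--                     total += 1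
--                     expiry[k] = day + durations[k]
--         return total
--     costs = [cost(plan) for plan in permutations(range(len(problems)))]
--     return min(costs + [7001])
-- ===== Notes on version B (the rewrite author's own statement) =====
-- stated objective: simpler
-- what changed: B observes that A's early break is pure pruning (whenever it fires the running minimum is unchanged), so it removes the threshold and break entirely and replaces A's per-day forward-filled memory lists by a standalone cost(plan) function with a lazy per-knowledge expiry dictionary and an inline counting loop, returning min over the mapped costs.
import Mathlib
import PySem

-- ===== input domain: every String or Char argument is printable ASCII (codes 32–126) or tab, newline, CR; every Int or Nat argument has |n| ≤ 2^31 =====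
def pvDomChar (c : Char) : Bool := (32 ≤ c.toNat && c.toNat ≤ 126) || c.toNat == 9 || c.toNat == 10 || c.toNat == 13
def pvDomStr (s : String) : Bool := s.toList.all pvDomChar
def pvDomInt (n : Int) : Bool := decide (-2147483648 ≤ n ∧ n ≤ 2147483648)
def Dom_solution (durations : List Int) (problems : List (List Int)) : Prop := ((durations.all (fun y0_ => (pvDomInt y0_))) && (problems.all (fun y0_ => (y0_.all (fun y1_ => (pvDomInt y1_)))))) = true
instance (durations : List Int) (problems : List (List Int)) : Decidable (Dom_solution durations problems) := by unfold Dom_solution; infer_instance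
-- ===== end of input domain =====

-- B drops A's pruning break and per-day forward-filled memory lists entirely: a standalone
-- cost function per permutation (lazy expiry dictionary, inline counting), then min of the
-- mapped costs — simpler state and control flow.

-- ===== PORT A =====
-- per-plan day loop of A: recursion over the remaining plan entries, carrying the day counter,
-- the running learn count and the list-of-lists `knowledges` (n = len(plan)).
-- (`(PySem.List.pyGet? durations k).getD 0`: under Pre_solution the lookup is always `some`.)
def dayLoopA (durations : List Int) (problems : List (List Int)) (n : Nat) (result : Int) :
    List Int → Nat → Int → List (List Int) → Int
  | [], _, learn, _ => learn
  | p :: rest, day, learn, kn =>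
    let problem := (PySem.List.pyGet? problems p).getD []
    let ktl := PySem.Set.diff (PySem.Set.ofList problem) (kn.getD day [])
    let learn' := learn + (ktl.length : Int)
    if learn' ≥ result then learn'
    else
      let kn' := ktl.foldl (fun kn k =>
        (PySem.List.pyRange (day : Int)
            (min ((day : Int) + (PySem.List.pyGet? durations k).getD 0) (n : Int))).foldl
          (fun kn date => kn.set date.toNat ((kn.getD date.toNat []) ++ [k])) kn) kn
      dayLoopA durations problems n result rest (day + 1) learn' kn'

def solution (durations : List Int) (problems : List (List Int)) : Int :=
  let rng := PySem.List.pyRange 0 (problems.length : Int)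
  let plans := PySem.List.permutations rng rng.length
  plans.foldl (fun result plan =>
    min (dayLoopA durations problems plan.length result plan 0 0
          (List.replicate plan.length [])) result) 7001

-- ===== PORT B =====
-- cost(plan)'s day loop: recursion over the remaining plan entries; the inner `for k in set(...)`
-- with its `if` is a fold over the distinct knowledges carrying (total, expiry).
def costLoop (durations : List Int) (problems : List (List Int)) :
    List Int → Nat → Int → PySem.Dict Int Int → Int
  | [], _, total, _ => total
  | p :: rest, day, total, expiry =>
    let st := ((PySem.Set.ofList ((PySem.List.pyGet? problems p).getD [])) : List Int).foldl
      (fun (st : Int × PySem.Dict Int Int) k =>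
        if (day : Int) ≥ st.2.getD k (day : Int) then
          (st.1 + 1, st.2.insert k ((day : Int) + (PySem.List.pyGet? durations k).getD 0))
        else st) (total, expiry)
    costLoop durations problems rest (day + 1) st.1 st.2

def solution_alt (durations : List Int) (problems : List (List Int)) : Int :=
  let rng := PySem.List.pyRange 0 (problems.length : Int)
  let plans := PySem.List.permutations rng rng.length
  let costs := plans.map (fun plan => costLoop durations problems plan 0 0 PySem.Dict.empty)
  -- min(costs + [7001]): the argument list is nonempty, so min? is always `some`
  (PySem.List.min? (costs ++ [7001]) (fun x => x)).getD 0

-- ===== PRECONDITION & SPEC =====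
-- A indexes `durations[knowledge]` for knowledges taken from the problems; Pre_ excludes exactly
-- the inputs holding a knowledge outside Python's (negative-wrapping) index range for durations,
-- on which A raises IndexError.
def Pre_solution (durations : List Int) (problems : List (List Int)) : Prop :=
  ∀ p ∈ problems, ∀ k ∈ p, -(durations.length : Int) ≤ k ∧ k < (durations.length : Int)
instance (durations : List Int) (problems : List (List Int)) : Decidable (Pre_solution durations problems) := by unfold Pre_solution; infer_instance
def pvWitness_solution : List Int × List (List Int) := ([2, 1], [[0], [0, 1], [-1]])

def Spec_solution (durations : List Int) (problems : List (List Int)) (out : Int) : Prop := out = solution_alt durations problems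
instance (durations : List Int) (problems : List (List Int)) (out : Int) : Decidable (Spec_solution durations problems out) := by unfold Spec_solution; infer_instance

-- ===== CLAIM (what is proved, stated in full; the proofs are below) =====
def Claim_equal_solution : Prop := ∀ (durations : List Int) (problems : List (List Int)), Dom_solution durations problems → Pre_solution durations problems → Spec_solution durations problems (solution durations problems)

-- ===== LEMMAS AND PROOFS =====

-- the invariant tying A's knowledges array to B's expiry dictionary: for every day d still to
-- come, knowledge k is remembered on day d iff its recorded expiry lies strictly beyond d.
def InvKE (n day : Nat) (kn : List (List Int)) (e : PySem.Dict Int Int) : Prop :=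
  kn.length = n ∧
  ∀ d : Nat, day ≤ d → d < n →
    ∀ k : Int, k ∈ kn.getD d [] ↔ ∃ v, e.get? k = some v ∧ (d : Int) < v

lemma length_fold_set (L : List Int) (kn : List (List Int)) (k : Int) :
    (L.foldl (fun kn date => kn.set date.toNat ((kn.getD date.toNat []) ++ [k])) kn).length
      = kn.length := by
  induction L generalizing kn with
  | nil => rfl
  | cons t L ih => rw [List.foldl_cons, ih, List.length_set]

lemma mem_fold_set (L : List Int) (hL : ∀ t ∈ L, 0 ≤ t) (kn : List (List Int)) (k x : Int)
    (d : Nat) :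
    x ∈ (L.foldl (fun kn date => kn.set date.toNat ((kn.getD date.toNat []) ++ [k])) kn).getD d []
      ↔ x ∈ kn.getD d [] ∨ (x = k ∧ (d : Int) ∈ L ∧ d < kn.length) := by
  induction L generalizing kn with
  | nil => simp
  | cons t L ih =>
    have ht : 0 ≤ t := hL t (List.mem_cons_self ..)
    have hL' : ∀ u ∈ L, 0 ≤ u := fun u hu => hL u (List.mem_cons_of_mem _ hu)
    rw [List.foldl_cons, ih hL', List.length_set]
    have hget : ∀ j : Nat, (kn.set t.toNat ((kn.getD t.toNat []) ++ [k])).getD j []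
        = if t.toNat = j ∧ t.toNat < kn.length then kn.getD t.toNat [] ++ [k] else kn.getD j [] := by
      intro j
      rw [List.getD_eq_getElem?_getD, List.getElem?_set]
      by_cases hj : t.toNat = j
      · by_cases hl : t.toNat < kn.length
        · rw [hj] at hl
          simp [hj, hl, List.getD_eq_getElem?_getD]
        · have hn : kn[j]? = none := by rw [List.getElem?_eq_none_iff]; omega
          rw [hj] at hl
          simp [hj, hl, List.getD_eq_getElem?_getD]
      · simp [hj, List.getD_eq_getElem?_getD]
    rw [hget d]
    by_cases h1 : t.toNat = d ∧ t.toNat < kn.length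
    · obtain ⟨h1a, h1b⟩ := h1
      subst h1a
      rw [if_pos ⟨rfl, h1b⟩, List.mem_append, List.mem_singleton, List.mem_cons]
      have hdt : ((t.toNat : Int)) = t := by omega
      constructor
      · rintro ((h | h) | ⟨hx, hdL, hlen⟩)
        · exact Or.inl h
        · exact Or.inr ⟨h, Or.inl hdt, h1b⟩
        · exact Or.inr ⟨hx, Or.inr hdL, hlen⟩
      · rintro (h | ⟨hx, _, _⟩)
        · exact Or.inl (Or.inl h)
        · exact Or.inl (Or.inr hx)
    · rw [if_neg h1, List.mem_cons]
      constructor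
      · rintro (h | ⟨hx, hdL, hlen⟩)
        · exact Or.inl h
        · exact Or.inr ⟨hx, Or.inr hdL, hlen⟩
      · rintro (h | ⟨hx, (hdt | hdL), hlen⟩)
        · exact Or.inl h
        · exfalso; omega
        · exact Or.inr ⟨hx, hdL, hlen⟩

lemma length_updateAll (durations : List Int) (ktl : List Int) (kn : List (List Int))
    (day n : Nat) :
    (ktl.foldl (fun kn k =>
        (PySem.List.pyRange (day : Int)
            (min ((day : Int) + (PySem.List.pyGet? durations k).getD 0) (n : Int))).foldl
          (fun kn date => kn.set date.toNat ((kn.getD date.toNat []) ++ [k])) kn) kn).length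
      = kn.length := by
  induction ktl generalizing kn with
  | nil => rfl
  | cons c ktl ih => rw [List.foldl_cons, ih, length_fold_set]

lemma mem_updateAll (durations : List Int) (ktl : List Int) (kn : List (List Int))
    (day n : Nat) (x : Int) (d : Nat) (hd : d < kn.length) :
    x ∈ (ktl.foldl (fun kn k =>
        (PySem.List.pyRange (day : Int)
            (min ((day : Int) + (PySem.List.pyGet? durations k).getD 0) (n : Int))).foldl
          (fun kn date => kn.set date.toNat ((kn.getD date.toNat []) ++ [k])) kn) kn).getD d []
      ↔ x ∈ kn.getD d [] ∨
        (x ∈ ktl ∧ (day : Int) ≤ (d : Int) ∧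
          (d : Int) < min ((day : Int) + (PySem.List.pyGet? durations x).getD 0) (n : Int)) := by
  induction ktl generalizing kn with
  | nil => simp
  | cons c ktl ih =>
    rw [List.foldl_cons]
    have hnn : ∀ t ∈ PySem.List.pyRange (day : Int)
        (min ((day : Int) + (PySem.List.pyGet? durations c).getD 0) (n : Int)), 0 ≤ t := by
      intro t htm
      have := PySem.List.mem_pyRange_one.mp htm
      omega
    have hlen := length_fold_set (PySem.List.pyRange (day : Int)
        (min ((day : Int) + (PySem.List.pyGet? durations c).getD 0) (n : Int))) kn c
    rw [ih _ (by rw [hlen]; exact hd), mem_fold_set _ hnn, List.mem_cons]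
    constructor
    · rintro ((h | ⟨hx, hdR, _⟩) | ⟨hm, h2, h3⟩)
      · exact Or.inl h
      · subst hx
        have := PySem.List.mem_pyRange_one.mp hdR
        exact Or.inr ⟨Or.inl rfl, this.1, this.2⟩
      · exact Or.inr ⟨Or.inr hm, h2, h3⟩
    · rintro (h | ⟨(hc | hm), h2, h3⟩)
      · exact Or.inl (Or.inl h)
      · subst hc
        exact Or.inl (Or.inr ⟨rfl, PySem.List.mem_pyRange_one.mpr ⟨h2, h3⟩, hd⟩)
      · exact Or.inr ⟨hm, h2, h3⟩

lemma get?_fold_insert (L : List Int) (e : PySem.Dict Int Int) (f : Int → Int) (k : Int) :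
    (L.foldl (fun e k => e.insert k (f k)) e).get? k
      = if k ∈ L then some (f k) else e.get? k := by
  induction L generalizing e with
  | nil => simp
  | cons t L ih =>
    simp only [List.foldl_cons, ih, List.mem_cons]
    by_cases hk : k ∈ L
    · simp [hk]
    · simp [hk, PySem.Dict.get?_insert]
      split_ifs <;> simp_all

-- characterisation of B's inner counting fold over a duplicate-free knowledge list: the total
-- grows by the number of not-remembered knowledges (judged against the INITIAL dict) and the
-- dict gains exactly their expiry entries.
lemma inner_fold_eq (durations : List Int) (day : Nat) (S : List Int) (hS : S.Nodup)
    (total : Int) (e : PySem.Dict Int Int) :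
    S.foldl (fun (st : Int × PySem.Dict Int Int) k =>
        if (day : Int) ≥ st.2.getD k (day : Int) then
          (st.1 + 1, st.2.insert k ((day : Int) + (PySem.List.pyGet? durations k).getD 0))
        else st) (total, e)
      = (total + (((S.filter (fun k => decide ((day : Int) ≥ e.getD k (day : Int)))).length : Nat) : Int),
         (S.filter (fun k => decide ((day : Int) ≥ e.getD k (day : Int)))).foldl
           (fun e k => e.insert k ((day : Int) + (PySem.List.pyGet? durations k).getD 0)) e) := by
  induction S generalizing total e with
  | nil => simp
  | cons c S ih =>
    have hcS : c ∉ S := (List.nodup_cons.mp hS).1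
    have hS' : S.Nodup := (List.nodup_cons.mp hS).2
    have hfc : S.filter (fun k => decide ((day : Int) ≥
          (e.insert c ((day : Int) + (PySem.List.pyGet? durations c).getD 0)).getD k (day : Int)))
        = S.filter (fun k => decide ((day : Int) ≥ e.getD k (day : Int))) := by
      apply List.filter_congr
      intro k hk
      have hne : k ≠ c := fun h => hcS (h ▸ hk)
      rw [PySem.Dict.getD_insert, if_neg hne]
    rw [List.foldl_cons, List.filter_cons]
    by_cases hc : (day : Int) ≥ e.getD c (day : Int)
    · rw [if_pos hc, if_pos (by simpa using hc), ih hS', hfc, List.foldl_cons,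
        Prod.mk.injEq]
      exact ⟨by simp only [List.length_cons]; push_cast; ring, rfl⟩
    · rw [if_neg hc, if_neg (by simpa using hc), ih hS']

-- the total of B's cost loop never drops below its starting value
lemma costLoop_ge (durations : List Int) (problems : List (List Int)) :
    ∀ (rest : List Int) (day : Nat) (total : Int) (e : PySem.Dict Int Int),
      total ≤ costLoop durations problems rest day total e := by
  intro rest
  induction rest with
  | nil => intro day total e; exact le_refl _
  | cons p rest ih =>
    intro day total e
    simp only [costLoop]
    rw [inner_fold_eq durations day _ (PySem.Set.nodup_ofList _) total e]
    exact le_trans (le_add_of_nonneg_right (Int.natCast_nonneg _)) (ih _ _ _)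

-- the core correspondence: pruned or not, against the running minimum both loops agree
lemma loop_eq (durations : List Int) (problems : List (List Int)) (n : Nat) (result : Int) :
    ∀ (rest : List Int) (day : Nat) (learn : Int) (kn : List (List Int))
      (e : PySem.Dict Int Int),
      day + rest.length ≤ n → InvKE n day kn e →
      min (dayLoopA durations problems n result rest day learn kn) result
        = min (costLoop durations problems rest day learn e) result := by
  intro rest
  induction rest with
  | nil => intro day learn kn e _ _; rfl
  | cons p rest ih =>
    intro day learn kn e hlen hinv
    obtain ⟨hknlen, hmem⟩ := hinv
    have hday : day < n := by simp at hlen; omega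
    have hfilter : PySem.Set.diff (PySem.Set.ofList ((PySem.List.pyGet? problems p).getD []))
          (kn.getD day [])
        = ((PySem.Set.ofList ((PySem.List.pyGet? problems p).getD [])) : List Int).filter
            (fun k => decide ((day : Int) ≥ e.getD k (day : Int))) := by
      apply List.filter_congr
      intro k _
      have h := hmem day le_rfl hday k
      cases hek : e.get? k with
      | none =>
        have hnm : k ∉ kn.getD day [] := by
          intro hm
          obtain ⟨v, hv, _⟩ := h.mp hm
          rw [hek] at hv
          exact absurd hv.symm (Option.some_ne_none v)
        have hnm' : k ∉ kn[day]?.getD [] := by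
          rw [← List.getD_eq_getElem?_getD]; exact hnm
        simp [PySem.Dict.getD, hek, hnm']
      | some v =>
        simp only [PySem.Dict.getD, hek, Option.getD_some]
        by_cases hvd : (day : Int) < v
        · have hm : k ∈ kn[day]?.getD [] := by
            rw [← List.getD_eq_getElem?_getD]; exact h.mpr ⟨v, hek, hvd⟩
          simp [hm, not_le.mpr hvd]
        · have hnm : k ∉ kn[day]?.getD [] := by
            rw [← List.getD_eq_getElem?_getD]
            intro hm
            obtain ⟨w, hw, hdw⟩ := h.mp hm
            rw [hek] at hw
            exact hvd (Option.some.inj hw ▸ hdw)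
          simp [hnm, not_lt.mp hvd]
    simp only [dayLoopA, costLoop]
    rw [inner_fold_eq durations day _ (PySem.Set.nodup_ofList _) learn e, ← hfilter]
    by_cases hc : learn + ((PySem.Set.diff (PySem.Set.ofList ((PySem.List.pyGet? problems p).getD []))
          (kn.getD day [])).length : Int) ≥ result
    · rw [if_pos hc]
      have h1 : min (learn + ((PySem.Set.diff (PySem.Set.ofList ((PySem.List.pyGet? problems p).getD []))
            (kn.getD day [])).length : Int)) result = result := min_eq_right hc
      have h2 := costLoop_ge durations problems rest (day + 1)
          (learn + ((PySem.Set.diff (PySem.Set.ofList ((PySem.List.pyGet? problems p).getD []))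
            (kn.getD day [])).length : Int))
          ((PySem.Set.diff (PySem.Set.ofList ((PySem.List.pyGet? problems p).getD []))
            (kn.getD day [])).foldl
            (fun e k => e.insert k ((day : Int) + (PySem.List.pyGet? durations k).getD 0)) e)
      rw [h1, min_eq_right (le_trans hc h2)]
    · rw [if_neg hc]
      apply ih
      · simp at hlen ⊢; omega
      · constructor
        · rw [length_updateAll, hknlen]
        · intro d hd1 hd2 k
          rw [mem_updateAll durations _ kn day n k d (by omega)]
          rw [hfilter, get?_fold_insert _ _
              (fun k => (day : Int) + (PySem.List.pyGet? durations k).getD 0) k, ← hfilter]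
          by_cases hk : k ∈ PySem.Set.diff (PySem.Set.ofList ((PySem.List.pyGet? problems p).getD []))
              (kn.getD day [])
          · have hknot : k ∉ kn.getD day [] :=
              ((PySem.Set.mem_diff _ _ k).mp hk).2
            have hold : k ∉ kn.getD d [] := by
              intro hm
              obtain ⟨v, hv, hdv⟩ := (hmem d (by omega) hd2 k).mp hm
              have hvle : v ≤ (day : Int) := by
                rcases le_or_gt v (day : Int) with h' | h'
                · exact h'
                · exact absurd ((hmem day le_rfl hday k).mpr ⟨v, hv, h'⟩) hknot
              omega
            rw [if_pos hk]
            constructor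
            · rintro (hm | ⟨_, _, hlt⟩)
              · exact absurd hm hold
              · exact ⟨_, rfl, by omega⟩
            · rintro ⟨v, hv, hdv⟩
              obtain rfl := Option.some.inj hv
              exact Or.inr ⟨hk, by omega, by omega⟩
          · rw [if_neg hk]
            constructor
            · rintro (hm | ⟨hm, _, _⟩)
              · exact (hmem d (by omega) hd2 k).mp hm
              · exact absurd hm hk
            · intro hex
              exact Or.inl ((hmem d (by omega) hd2 k).mpr hex)

-- a left fold of `min` pulls a trailing element out
lemma foldl_min_out (l : List Int) (c a : Int) :
    min (l.foldl min c) a = l.foldl min (min c a) := by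
  induction l generalizing c a with
  | nil => rfl
  | cons d l ih =>
    rw [List.foldl_cons, List.foldl_cons, ih]
    congr 1
    rw [min_assoc, min_comm d a, ← min_assoc]

-- min(costs + [7001]) as the running-minimum fold A performs
lemma min?_append_singleton (l : List Int) (a : Int) :
    (PySem.List.min? (l ++ [a]) (fun x => x)).getD 0 = l.foldl (fun r c => min c r) a := by
  have hflip : (fun (r c : Int) => min c r) = min := by
    funext r c; exact min_comm c r
  rw [hflip]
  cases l with
  | nil => simp [PySem.List.min?_id_cons]
  | cons c l =>
    rw [List.cons_append, PySem.List.min?_id_cons, Option.getD_some, List.foldl_append]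
    simp only [List.foldl_cons, List.foldl_nil]
    rw [foldl_min_out, min_comm c a]

-- ===== VERDICT (by name: the statement is the Claim_ definition above) =====
theorem solution_spec : Claim_equal_solution := by
  intro durations problems _ _
  unfold Spec_solution solution solution_alt
  rw [min?_append_singleton, List.foldl_map]
  exact PySem.List.foldl_congr_mem _ _ _ _ (fun result plan _ =>
    loop_eq durations problems plan.length result plan 0 0
      (List.replicate plan.length []) PySem.Dict.empty (by simp)
      ⟨by simp, fun d _ hd k => by rw [List.getD_replicate _ hd]; simp⟩)
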